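-- pv_equiv track=rewrite | github.com/sjarmak/codeprobe | src/codeprobe/mining/curator_tiers.py | _heuristic_ground_truth_tiers
-- ===== SOURCE A (Python) =====
-- from collections.abc import Iterable, Mapping
--
-- _HOP_TIERS: tuple[str, ...] = ("required", "supplementary", "context")
--
-- def _bfs_distances(
--     seeds: frozenset[str],
--     reference_graph: Mapping[str, Iterable[str]],
--     *,
--     max_hops: int = 2,
-- ) -> dict[str, int]:
--     """Breadth-first hop distance from every seed, capped at ``max_hops``.
--
--     Returns a mapping of file path → minimum hop distance. Seeds are at
--     distance 0. Nodes unreachable within ``max_hops`` are not included.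
--     """
--     distances: dict[str, int] = {s: 0 for s in seeds}
--     frontier: list[str] = list(seeds)
--     hop = 0
--     while frontier and hop < max_hops:
--         hop += 1
--         next_frontier: list[str] = []
--         for node in frontier:
--             for neighbor in reference_graph.get(node, ()) or ():
--                 if neighbor in distances:
--                     continue
--                 distances[neighbor] = hop
--                 next_frontier.append(neighbor)
--         frontier = next_frontier
--     return distances
--
-- def _heuristic_ground_truth_tiers(
--     ground_truth_files: frozenset[str],
--     pr_diff_files: frozenset[str],
--     reference_graph: Mapping[str, Iterable[str]],
-- ) -> dict[str, str]:
--     """Graph-distance heuristic: PR-diff → required, 1-hop → supplementary,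
--     2-hop → context. Files beyond 2 hops or disconnected default to
--     ``context`` so every ground-truth file receives a tier.
--     """
--     distances = _bfs_distances(pr_diff_files, reference_graph, max_hops=2)
--     tiers: dict[str, str] = {}
--     for path in ground_truth_files:
--         hop = distances.get(path)
--         if hop is None:
--             tiers[path] = "context"
--         else:
--             tiers[path] = _HOP_TIERS[min(hop, len(_HOP_TIERS) - 1)]
--     return tiers
-- ===== SOURCE B (Python) =====
-- _HOP_TIERS = ("required", "supplementary", "context")
--
-- def _heuristic_ground_truth_tiers(ground_truth_files, pr_diff_files, reference_graph):
--     """One-hop set algebra instead of BFS: 2-hop and unreachable files both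
--     get "context", so only the 0- and 1-hop sets are needed."""
--     supplementary = set()
--     for n in pr_diff_files:
--         supplementary.update(reference_graph.get(n) or ())
--     supplementary -= set(pr_diff_files)
--     return {
--         path: "required" if path in pr_diff_files
--         else ("supplementary" if path in supplementary else "context")
--         for path in ground_truth_files
--     }
-- ===== Notes on version B (the rewrite author's own statement) =====
-- stated objective: simpler
-- what changed: Replaces the capped BFS (frontier/hop while-loop building a minimum-distance dict, then indexing a tier tuple by min(hop,2)) with one-hop set algebra: supplementary = union of neighbours of pr_diff_files minus pr_diff_files, and every other ground-truth file is context, since 2-hop and unreachable files receive the same tier.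
import Mathlib
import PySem

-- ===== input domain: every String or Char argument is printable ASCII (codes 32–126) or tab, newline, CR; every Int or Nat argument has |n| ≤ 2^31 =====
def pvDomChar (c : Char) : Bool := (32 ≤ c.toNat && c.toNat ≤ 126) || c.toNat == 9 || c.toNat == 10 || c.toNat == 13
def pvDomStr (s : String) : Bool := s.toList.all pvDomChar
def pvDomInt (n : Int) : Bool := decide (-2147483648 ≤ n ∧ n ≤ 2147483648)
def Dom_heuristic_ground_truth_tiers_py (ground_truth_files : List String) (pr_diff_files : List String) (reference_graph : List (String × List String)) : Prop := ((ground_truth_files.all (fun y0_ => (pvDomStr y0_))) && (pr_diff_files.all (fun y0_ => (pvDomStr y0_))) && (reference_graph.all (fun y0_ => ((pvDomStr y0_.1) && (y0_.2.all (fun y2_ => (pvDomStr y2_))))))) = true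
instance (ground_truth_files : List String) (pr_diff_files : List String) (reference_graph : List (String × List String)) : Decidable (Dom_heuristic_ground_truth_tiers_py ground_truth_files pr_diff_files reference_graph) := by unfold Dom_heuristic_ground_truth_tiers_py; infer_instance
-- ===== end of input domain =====

-- B replaces A's capped BFS with one-hop set algebra (simpler: 2-hop and unreachable files get the same tier).

-- ===== PORT A =====
-- _HOP_TIERS
def pvHopTiers : List String := ["required", "supplementary", "context"]

-- inner loop of _bfs_distances: 'for neighbor in reference_graph.get(node, ()) or (): …'
-- state = (distances, next_frontier)
def pvBfsInner (g : PySem.Dict String (List String)) (hop : Int)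
    (st : PySem.Dict String Int × List String) (node : String) :
    PySem.Dict String Int × List String :=
  (g.getD node []).foldl
    (fun st neighbor =>
      if st.1.contains neighbor then st
      else (st.1.insert neighbor hop, st.2 ++ [neighbor]))
    st

-- the 'while frontier and hop < max_hops' loop; terminates because hop increases each pass,
-- so fuel = (max_hops - hop).toNat is never the limiting factor (guard 'hop < max_hops' fires first)
def pvBfsWhile (g : PySem.Dict String (List String)) (max_hops : Int) :
    Nat → PySem.Dict String Int → List String → Int → PySem.Dict String Int
  | 0, distances, _, _ => distances
  | fuel + 1, distances, frontier, hop =>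
    if frontier ≠ [] ∧ hop < max_hops then
      let hop' := hop + 1
      let st := frontier.foldl (pvBfsInner g hop') (distances, [])
      pvBfsWhile g max_hops fuel st.1 st.2 hop'
    else distances

def pvBfsDistances (seeds : List String) (g : PySem.Dict String (List String)) :
    PySem.Dict String Int :=
  let distances := seeds.foldl (fun d s => d.insert s (0 : Int)) PySem.Dict.empty
  pvBfsWhile g 2 2 distances seeds 0

def heuristic_ground_truth_tiers_py (ground_truth_files : List String) (pr_diff_files : List String) (reference_graph : List (String × List String)) : List (String × String) :=
  let distances := pvBfsDistances pr_diff_files (PySem.Dict.ofList reference_graph)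
  (ground_truth_files.foldl
    (fun tiers path =>
      tiers.insert path
        (match distances.get? path with
         | none => "context"
         | some hop => PySem.List.pyGetD pvHopTiers (min hop 2) "context"))  -- index min hop 2 ∈ {0,1,2}: the default is never read
    PySem.Dict.empty).items

-- ===== PORT B =====
def heuristic_ground_truth_tiers_py_alt (ground_truth_files : List String) (pr_diff_files : List String) (reference_graph : List (String × List String)) : List (String × String) :=
  let g := PySem.Dict.ofList reference_graph
  let supplementary0 : PySem.Set String :=
    pr_diff_files.foldl (fun s n => PySem.Set.update s (g.getD n [])) PySem.Set.empty
  let supplementary := PySem.Set.diff supplementary0 (PySem.Set.ofList pr_diff_files)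
  (ground_truth_files.foldl
    (fun tiers path =>
      tiers.insert path
        (if path ∈ pr_diff_files then "required"
         else if path ∈ supplementary then "supplementary"
         else "context"))
    PySem.Dict.empty).items

-- ===== PRECONDITION & SPEC =====
def Spec_heuristic_ground_truth_tiers_py (ground_truth_files : List String) (pr_diff_files : List String) (reference_graph : List (String × List String)) (out : List (String × String)) : Prop := out = heuristic_ground_truth_tiers_py_alt ground_truth_files pr_diff_files reference_graph
instance (ground_truth_files : List String) (pr_diff_files : List String) (reference_graph : List (String × List String)) (out : List (String × String)) : Decidable (Spec_heuristic_ground_truth_tiers_py ground_truth_files pr_diff_files reference_graph out) := by unfold Spec_heuristic_ground_truth_tiers_py; infer_instance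

-- ===== CLAIM (what is proved, stated in full; the proofs are below) =====
def Claim_equal_heuristic_ground_truth_tiers_py : Prop := ∀ (ground_truth_files : List String) (pr_diff_files : List String) (reference_graph : List (String × List String)), Dom_heuristic_ground_truth_tiers_py ground_truth_files pr_diff_files reference_graph → Spec_heuristic_ground_truth_tiers_py ground_truth_files pr_diff_files reference_graph (heuristic_ground_truth_tiers_py ground_truth_files pr_diff_files reference_graph)

-- ===== LEMMAS AND PROOFS =====

lemma get?_seed_foldl (pdf : List String) (p : String) :
    ∀ d : PySem.Dict String Int,
      (pdf.foldl (fun d s => d.insert s (0 : Int)) d).get? p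
        = if p ∈ pdf then some 0 else d.get? p := by
  induction pdf with
  | nil => simp
  | cons s rest ih =>
    intro d
    simp only [List.foldl_cons, ih, List.mem_cons]
    by_cases hp : p ∈ rest
    · simp [hp]
    · by_cases hps : p = s
      · simp [hp, hps, PySem.Dict.get?_insert_self]
      · simp [hp, hps, PySem.Dict.get?_insert_of_ne _ _ hps]

lemma get?_foldl_nb (hop : Int) (p : String) (ns : List String) :
    ∀ st : PySem.Dict String Int × List String,
      ((ns.foldl (fun st neighbor =>
          if st.1.contains neighbor then st
          else (st.1.insert neighbor hop, st.2 ++ [neighbor])) st).1).get? p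
        = if (st.1.get? p).isSome then st.1.get? p
          else if p ∈ ns then some hop else none := by
  induction ns with
  | nil => simp
  | cons nb rest ih =>
    intro st
    simp only [List.foldl_cons, ih, List.mem_cons]
    by_cases hc : st.1.contains nb
    · have hsome : (st.1.get? nb).isSome := by
        rw [← PySem.Dict.contains_eq_isSome_get?]; exact hc
      simp only [hc, if_pos, if_true]
      by_cases hpn : p = nb
      · subst hpn; simp [hsome]
      · simp [hpn]
    · have hnone : st.1.get? nb = none := by
        rcases h : st.1.get? nb with _ | v
        · rfl
        · exact absurd (by rw [PySem.Dict.contains_eq_isSome_get?, h]; rfl) hc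
      simp only [hc, if_false, if_neg]
      by_cases hpn : p = nb
      · subst hpn
        simp [PySem.Dict.get?_insert_self, hnone]
      · simp [PySem.Dict.get?_insert_of_ne _ _ hpn, hpn]

lemma get?_bfsInner (g : PySem.Dict String (List String)) (hop : Int) (n p : String) :
    ∀ st : PySem.Dict String Int × List String,
      (pvBfsInner g hop st n).1.get? p
        = if (st.1.get? p).isSome then st.1.get? p
          else if p ∈ g.getD n [] then some hop else none := by
  intro st
  exact get?_foldl_nb hop p (g.getD n []) st

lemma get?_bfsPass (g : PySem.Dict String (List String)) (hop : Int) (p : String)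
    (frontier : List String) :
    ∀ st : PySem.Dict String Int × List String,
      ((frontier.foldl (pvBfsInner g hop) st).1).get? p
        = if (st.1.get? p).isSome then st.1.get? p
          else if ∃ n ∈ frontier, p ∈ g.getD n [] then some hop else none := by
  induction frontier with
  | nil => simp
  | cons n rest ih =>
    intro st
    simp only [List.foldl_cons, ih, get?_bfsInner, List.mem_cons]
    by_cases hs : (st.1.get? p).isSome
    · simp [hs]
    · by_cases hn : p ∈ g.getD n []
      · simp only [hs, if_false, hn, if_true, Option.isSome_some, if_pos]
        have : ∃ m, (m = n ∨ m ∈ rest) ∧ p ∈ g.getD m [] := ⟨n, Or.inl rfl, hn⟩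
        simp [this]
      · simp only [hs, if_false, hn]
        simp only [Option.isSome_none, Bool.false_eq_true, if_false]
        by_cases hr : ∃ m ∈ rest, p ∈ g.getD m []
        · rcases hr with ⟨m, hm1, hm2⟩
          have h1 : ∃ m, (m = n ∨ m ∈ rest) ∧ p ∈ g.getD m [] := ⟨m, Or.inr hm1, hm2⟩
          have h2 : ∃ m ∈ rest, p ∈ g.getD m [] := ⟨m, hm1, hm2⟩
          simp [h1, h2]
        · have : ¬ ∃ m, (m = n ∨ m ∈ rest) ∧ p ∈ g.getD m [] := by
            rintro ⟨m, hm1 | hm1, hm2⟩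
            · exact hn (hm1 ▸ hm2)
            · exact hr ⟨m, hm1, hm2⟩
          have h2 : ¬ ∃ m ∈ rest, p ∈ g.getD m [] := hr
          simp [this, h2]

lemma mem_supp0 (g : PySem.Dict String (List String)) (p : String) (pdf : List String) :
    ∀ s : PySem.Set String,
      (p ∈ pdf.foldl (fun s n => PySem.Set.update s (g.getD n [])) s
        ↔ p ∈ s ∨ ∃ n ∈ pdf, p ∈ g.getD n []) := by
  induction pdf with
  | nil => simp
  | cons n rest ih =>
    intro s
    simp only [List.foldl_cons, ih, PySem.Set.mem_update, List.mem_cons]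
    constructor
    · rintro (⟨h | h⟩ | ⟨m, hm1, hm2⟩)
      · exact Or.inl h
      · exact Or.inr ⟨n, Or.inl rfl, h⟩
      · exact Or.inr ⟨m, Or.inr hm1, hm2⟩
    · rintro (h | ⟨m, hm1 | hm1, hm2⟩)
      · exact Or.inl (Or.inl h)
      · exact Or.inl (Or.inr (hm1 ▸ hm2))
      · exact Or.inr ⟨m, hm1, hm2⟩

lemma foldl_insert_congr (gtf : List String) (f h : String → String)
    (hfh : ∀ p ∈ gtf, f p = h p) :
    ∀ t : PySem.Dict String String,
      gtf.foldl (fun t p => t.insert p (f p)) t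
        = gtf.foldl (fun t p => t.insert p (h p)) t := by
  induction gtf with
  | nil => simp
  | cons q rest ih =>
    intro t
    simp only [List.foldl_cons]
    rw [hfh q (List.mem_cons_self ..), ih (fun p hp => hfh p (List.mem_cons_of_mem _ hp))]

lemma label_eq (pdf : List String) (graph : List (String × List String)) (p : String) :
    (match (pvBfsDistances pdf (PySem.Dict.ofList graph)).get? p with
     | none => "context"
     | some hop => PySem.List.pyGetD pvHopTiers (min hop 2) "context")
    = (if p ∈ pdf then "required"
       else if p ∈ PySem.Set.diff
              (pdf.foldl (fun s n => PySem.Set.update s ((PySem.Dict.ofList graph).getD n []))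
                PySem.Set.empty)
              (PySem.Set.ofList pdf) then "supplementary"
       else "context") := by
  set g := PySem.Dict.ofList graph with hg
  have hs0 : ∀ s0 : PySem.Set String, p ∈ pdf.foldl (fun s n => PySem.Set.update s (g.getD n [])) s0
      ↔ p ∈ s0 ∨ ∃ n ∈ pdf, p ∈ g.getD n [] := mem_supp0 g p pdf
  have hd0 : (pdf.foldl (fun d s => d.insert s (0 : Int)) PySem.Dict.empty).get? p
      = if p ∈ pdf then some 0 else none := by
    rw [get?_seed_foldl]; simp [PySem.Dict.get?_empty]
  by_cases hpdf : pdf = []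
  · subst hpdf
    simp [pvBfsDistances, pvBfsWhile, PySem.Dict.get?_empty, hs0, PySem.Set.mem_diff, PySem.Set.mem_ofList]
  · have h2 : (pvBfsDistances pdf g)
        = (let st1 := pdf.foldl (pvBfsInner g 1)
              (pdf.foldl (fun d s => d.insert s (0 : Int)) PySem.Dict.empty, []);
           pvBfsWhile g 2 1 st1.1 st1.2 1) := by
      simp [pvBfsDistances, pvBfsWhile, hpdf]
    rw [h2]
    set d0 := pdf.foldl (fun d s => d.insert s (0 : Int)) PySem.Dict.empty with hd0def
    set st1 := pdf.foldl (pvBfsInner g 1) (d0, []) with hst1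
    have hd1 : st1.1.get? p
        = if p ∈ pdf then some 0
          else if ∃ n ∈ pdf, p ∈ g.getD n [] then some 1 else none := by
      rw [hst1, get?_bfsPass, hd0]
      by_cases hp : p ∈ pdf
      · simp [hp]
      · simp [hp]
    by_cases hf1 : st1.2 = []
    · have h3 : pvBfsWhile g 2 1 st1.1 st1.2 1 = st1.1 := by
        simp [pvBfsWhile, hf1]
      rw [h3, hd1]
      by_cases hp : p ∈ pdf
      · simp [hp, pvHopTiers, PySem.List.pyGetD]
      · by_cases hn : ∃ n ∈ pdf, p ∈ g.getD n []
        · simp [hp, hn, hs0, PySem.Set.mem_diff, PySem.Set.mem_ofList, pvHopTiers, PySem.List.pyGetD]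
        · simp [hp, hn, hs0, PySem.Set.mem_diff, PySem.Set.mem_ofList, pvHopTiers]
    · have h3 : pvBfsWhile g 2 1 st1.1 st1.2 1
          = (st1.2.foldl (pvBfsInner g 2) (st1.1, [])).1 := by
        simp [pvBfsWhile, hf1]
      rw [h3, get?_bfsPass, hd1]
      by_cases hp : p ∈ pdf
      · simp [hp, pvHopTiers, PySem.List.pyGetD]
      · by_cases hn : ∃ n ∈ pdf, p ∈ g.getD n []
        · simp [hp, hn, hs0, PySem.Set.mem_diff, PySem.Set.mem_ofList, pvHopTiers, PySem.List.pyGetD]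
        · by_cases hn2 : ∃ n ∈ st1.2, p ∈ g.getD n []
          · simp [hp, hn, hn2, hs0, PySem.Set.mem_diff, PySem.Set.mem_ofList, pvHopTiers, PySem.List.pyGetD]
          · simp [hp, hn, hn2, hs0, PySem.Set.mem_diff, PySem.Set.mem_ofList, pvHopTiers]

-- ===== VERDICT (by name: the statement is the Claim_ definition above) =====
theorem heuristic_ground_truth_tiers_py_spec : Claim_equal_heuristic_ground_truth_tiers_py := by
  intro ground_truth_files pr_diff_files reference_graph _
  simp only [Spec_heuristic_ground_truth_tiers_py, heuristic_ground_truth_tiers_py,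
    heuristic_ground_truth_tiers_py_alt]
  refine congrArg PySem.Dict.items ?_
  exact foldl_insert_congr ground_truth_files _ _
    (fun p _ => label_eq pr_diff_files reference_graph p) PySem.Dict.empty
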